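-- pv_equiv track=rewrite | github.com/HealYouDown/advent-of-code-2021 | day_14.py | polymer_step
-- ===== SOURCE A (Python) =====
-- from typing import Tuple, Dict, List
-- from collections import Counter
--
-- def polymer_step(polymer_template: str, mapping: Dict[str, str], step: int) -> int:
--     polymer: List[str] = list(polymer_template)
--
--     for _ in range(step):
--         polymer_tmp = []
--
--         for index, char in enumerate(polymer):
--             try:
--                 next_char = polymer[index+1]
--             except IndexError:
--                 polymer_tmp.append(char)
--                 break
--
--             pair = char + next_char
--
--             if pair in mapping:
--                 polymer_tmp.extend(char + mapping[pair])
--             else: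
--                 polymer_tmp.append(char)
--
--         polymer = polymer_tmp
--
--     counter = Counter(polymer)
--     most_common = counter.most_common()
--     mc = most_common[0][1]
--     lc = most_common[-1][1]
--
--     return mc - lc
-- ===== SOURCE B (Python) =====
-- from collections import Counter
--
-- def polymer_step(polymer_template: str, mapping, step: int) -> int:
--     # Count adjacent pairs instead of materialising the polymer: O(step * pairs).
--     pairs = Counter(zip(polymer_template, polymer_template[1:]))
--     for _ in range(step):
--         new_pairs = Counter()
--         for (a, b), n in pairs.items():
--             seq = a + mapping.get(a + b, "") + b
--             for xy in zip(seq, seq[1:]):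
--                 new_pairs[xy] += n
--         pairs = new_pairs
--     counts = Counter()
--     for (a, _), n in pairs.items():
--         counts[a] += n
--     counts[polymer_template[-1]] += 1
--     return max(counts.values()) - min(counts.values())
-- ===== Notes on version B (the rewrite author's own statement) =====
-- stated objective: faster
-- what changed: B never materialises the exponentially growing polymer: it keeps a Counter of adjacent pairs, updates it once per step via the insertion rule, and derives the character counts from pair counts plus the invariant last character.
import Mathlib
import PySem

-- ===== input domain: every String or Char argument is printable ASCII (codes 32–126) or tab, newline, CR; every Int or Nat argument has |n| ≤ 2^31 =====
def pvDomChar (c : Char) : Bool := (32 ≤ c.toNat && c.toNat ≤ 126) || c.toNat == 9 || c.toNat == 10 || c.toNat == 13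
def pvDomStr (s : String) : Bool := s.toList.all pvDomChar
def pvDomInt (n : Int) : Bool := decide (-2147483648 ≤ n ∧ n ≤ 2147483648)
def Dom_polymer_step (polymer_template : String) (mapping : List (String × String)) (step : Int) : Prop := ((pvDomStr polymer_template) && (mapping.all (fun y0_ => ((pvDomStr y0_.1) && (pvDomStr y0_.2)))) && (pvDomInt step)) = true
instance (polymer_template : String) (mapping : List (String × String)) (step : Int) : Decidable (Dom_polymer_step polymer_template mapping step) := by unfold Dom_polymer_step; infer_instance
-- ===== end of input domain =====

-- B replaces A's explicit exponential polymer expansion by a counter of adjacent pairs,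
-- updated once per step; objective: faster (asymptotic).

-- ===== PORT A =====
-- inner 'for index, char in enumerate(polymer)' loop, with the try/except-IndexError break
def polymerGoA (m : PySem.Dict String String) (p : List Char) (i : Nat) (acc : List Char) : List Char :=
  if h : i < p.length then
    match PySem.List.pyGet? p ((i : Int) + 1) with
    | none => acc ++ [p[i]]                              -- IndexError: append char, break
    | some c' =>
      match m.get? (String.mk [p[i], c']) with           -- 'if pair in mapping: … mapping[pair]'
      | some v => polymerGoA m p (i+1) (acc ++ p[i] :: v.toList)
      | none => polymerGoA m p (i+1) (acc ++ [p[i]])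
  else acc
  termination_by p.length - i

def polymer_step (polymer_template : String) (mapping : List (String × String)) (step : Int) : Int :=
  let m := PySem.Dict.ofList mapping
  let final := (PySem.List.pyRange 0 step 1).foldl (fun p _ => polymerGoA m p 0 []) polymer_template.toList
  let mostCommon := PySem.List.sorted (PySem.Dict.counter final).items (fun kv => kv.2) true
  match PySem.List.pyGet? mostCommon 0, PySem.List.pyGet? mostCommon (-1) with
  | some mc, some lc => mc.2 - lc.2
  | _, _ => 0                                            -- IndexError (empty polymer): excluded by Pre_

-- ===== PORT B =====
def polymerPairsB (l : List Char) : List (Char × Char) := l.zip l.tail       -- zip(s, s[1:])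

def polymerSeqB (m : PySem.Dict String String) (a b : Char) : List Char :=
  a :: (m.getD (String.mk [a, b]) "").toList ++ [b]      -- a + mapping.get(a+b, "") + b

def polymerStepB (m : PySem.Dict String String) (d : PySem.Dict (Char × Char) Int) : PySem.Dict (Char × Char) Int :=
  d.items.foldl (fun nd kn =>
    (polymerPairsB (polymerSeqB m kn.1.1 kn.1.2)).foldl
      (fun nd2 xy => nd2.modify xy 0 (· + kn.2)) nd) PySem.Dict.empty

def polymer_step_alt (polymer_template : String) (mapping : List (String × String)) (step : Int) : Int :=
  let m := PySem.Dict.ofList mapping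
  let pairs := (PySem.List.pyRange 0 step 1).foldl (fun d _ => polymerStepB m d)
    (PySem.Dict.counter (polymerPairsB polymer_template.toList))
  let counts0 := pairs.items.foldl (fun c kn => c.modify kn.1.1 0 (· + kn.2)) PySem.Dict.empty
  match PySem.Str.pyGet? polymer_template (-1) with
  | none => 0                                            -- IndexError (empty template): excluded by Pre_
  | some ch =>
    let counts := counts0.modify ch 0 (· + 1)
    match PySem.List.max? counts.values (fun x => x) with
    | none => 0                                          -- unreachable: counts contains ch
    | some mx =>
      match PySem.List.min? counts.values (fun x => x) with
      | none => 0
      | some mn => mx - mn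

-- ===== PRECONDITION & SPEC =====
-- On the empty template A reaches most_common[0] of an empty counter and raises IndexError.
def Pre_polymer_step (polymer_template : String) (mapping : List (String × String)) (step : Int) : Prop :=
  polymer_template ≠ ""
instance (polymer_template : String) (mapping : List (String × String)) (step : Int) : Decidable (Pre_polymer_step polymer_template mapping step) := by unfold Pre_polymer_step; infer_instance

def pvWitness_polymer_step : String × (List (String × String)) × Int := ("NNCB", [("NC", "B"), ("CB", "H")], 3)

def Spec_polymer_step (polymer_template : String) (mapping : List (String × String)) (step : Int) (out : Int) : Prop := out = polymer_step_alt polymer_template mapping step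
instance (polymer_template : String) (mapping : List (String × String)) (step : Int) (out : Int) : Decidable (Spec_polymer_step polymer_template mapping step out) := by unfold Spec_polymer_step; infer_instance

-- ===== CLAIM (what is proved, stated in full; the proofs are below) =====
def Claim_equal_polymer_step : Prop := ∀ (polymer_template : String) (mapping : List (String × String)) (step : Int), Dom_polymer_step polymer_template mapping step → Pre_polymer_step polymer_template mapping step → Spec_polymer_step polymer_template mapping step (polymer_step polymer_template mapping step)

-- ===== LEMMAS AND PROOFS =====

-- the insertion string for a pair, and A's one-step rewriting of the polymer
def polymerIns (m : PySem.Dict String String) (a b : Char) : List Char := (m.getD (String.mk [a, b]) "").toList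

def polymerFstep (m : PySem.Dict String String) : List Char → List Char
  | [] => []
  | [c] => [c]
  | c :: c' :: t => (c :: polymerIns m c c') ++ polymerFstep m (c' :: t)

def polymerG (m : PySem.Dict String String) (ab : Char × Char) : List (Char × Char) :=
  polymerPairsB (polymerSeqB m ab.1 ab.2)

theorem polymerPyGet_succ (p : List Char) (i : Nat) : PySem.List.pyGet? p ((i:Int)+1) = p[i+1]? := by
  have h : ((i:Int)+1) = ((i+1 : Nat) : Int) := by push_cast; ring
  rw [h, PySem.List.pyGet?_natCast]

theorem polymerGoA_eq (m : PySem.Dict String String) (p : List Char) (i : Nat) (acc : List Char) :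
    polymerGoA m p i acc = acc ++ polymerFstep m (p.drop i) := by
  fun_induction polymerGoA m p i acc with
  | case1 i acc h hnone =>
    rw [polymerPyGet_succ] at hnone
    have hlen : p.length ≤ i + 1 := by
      by_contra hc
      rw [List.getElem?_eq_getElem (by omega)] at hnone
      simp at hnone
    have hd : p.drop i = [p[i]] := by
      rw [List.drop_eq_getElem_cons h, List.drop_eq_nil_of_le hlen]
    simp [hd, polymerFstep]
  | case2 i acc h c' hsome v hv ih =>
    rw [polymerPyGet_succ] at hsome
    have hi1 : i + 1 < p.length := by
      by_contra hc
      rw [List.getElem?_eq_none (by omega)] at hsome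
      simp at hsome
    rw [List.getElem?_eq_getElem hi1] at hsome
    have hc' : c' = p[i+1] := (Option.some.inj hsome).symm
    rw [ih, List.drop_eq_getElem_cons h, List.drop_eq_getElem_cons hi1]
    subst hc'
    have : polymerIns m p[i] p[i+1] = v.toList := by
      simp [polymerIns, PySem.Dict.getD_eq_get?_getD, hv]
    simp [polymerFstep, this]
  | case3 i acc h c' hsome hnone ih =>
    rw [polymerPyGet_succ] at hsome
    have hi1 : i + 1 < p.length := by
      by_contra hc
      rw [List.getElem?_eq_none (by omega)] at hsome
      simp at hsome
    rw [List.getElem?_eq_getElem hi1] at hsome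
    have hc' : c' = p[i+1] := (Option.some.inj hsome).symm
    rw [ih, List.drop_eq_getElem_cons h, List.drop_eq_getElem_cons hi1]
    subst hc'
    have : polymerIns m p[i] p[i+1] = [] := by
      simp [polymerIns, PySem.Dict.getD_eq_get?_getD, hnone]
    simp [polymerFstep, this]
  | case4 i acc h => rw [List.drop_eq_nil_of_le (by omega)]; simp [polymerFstep]
theorem polymerFstep_head (m : PySem.Dict String String) (c : Char) (t : List Char) :
    ∃ X, polymerFstep m (c :: t) = c :: X := by
  cases t with
  | nil => exact ⟨[], rfl⟩
  | cons c' t' => exact ⟨polymerIns m c c' ++ polymerFstep m (c' :: t'), rfl⟩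

theorem polymerFstep_ne_nil (m : PySem.Dict String String) (c : Char) (t : List Char) :
    polymerFstep m (c :: t) ≠ [] := by
  obtain ⟨X, hX⟩ := polymerFstep_head m c t
  simp [hX]

theorem polymerFstep_getLast? (m : PySem.Dict String String) (l : List Char) :
    (polymerFstep m l).getLast? = l.getLast? := by
  match l with
  | [] => rfl
  | [c] => rfl
  | c :: c' :: t =>
    have ih := polymerFstep_getLast? m (c' :: t)
    rw [polymerFstep, List.getLast?_append_of_ne_nil, ih, List.getLast?_cons_cons]
    exact polymerFstep_ne_nil m c' t

theorem polymerPairsB_cons_cons (a b : Char) (t : List Char) :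
    polymerPairsB (a :: b :: t) = (a, b) :: polymerPairsB (b :: t) := rfl

theorem polymerPairsB_split (xs : List Char) (y : Char) (ys : List Char) :
    polymerPairsB (xs ++ y :: ys) = polymerPairsB (xs ++ [y]) ++ polymerPairsB (y :: ys) := by
  induction xs with
  | nil => simp [polymerPairsB]
  | cons a xs ih =>
    cases xs with
    | nil => simp [polymerPairsB]
    | cons b xs' =>
      rw [List.cons_append, List.cons_append, polymerPairsB_cons_cons,
        ← List.cons_append, ih]
      simp [List.cons_append, polymerPairsB_cons_cons]

theorem polymerPairsB_fstep (m : PySem.Dict String String) (l : List Char) :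
    polymerPairsB (polymerFstep m l) = (polymerPairsB l).flatMap (polymerG m) := by
  match l with
  | [] => rfl
  | [c] => rfl
  | c :: c' :: t =>
    have ih := polymerPairsB_fstep m (c' :: t)
    obtain ⟨X, hX⟩ := polymerFstep_head m c' t
    rw [polymerFstep, hX, List.cons_append, ← List.cons_append,
      polymerPairsB_split (c :: polymerIns m c c') c' X, ← hX, ih,
      polymerPairsB_cons_cons, List.flatMap_cons]
    rfl

theorem polymerCount_eq (l : List Char) (hl : l ≠ []) (c : Char) :
    l.count c = (polymerPairsB l).countP (fun ab => ab.1 == c)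
      + (if l.getLast? = some c then 1 else 0) := by
  match l with
  | [x] =>
    by_cases hx : x = c <;> simp [polymerPairsB, hx]
  | a :: b :: t =>
    have ih := polymerCount_eq (b :: t) (by simp) c
    rw [List.count_cons, polymerPairsB_cons_cons, List.countP_cons, List.getLast?_cons_cons, ih]
    by_cases hx : a = c <;> simp [hx] <;> omega
theorem polymerGetD_foldl_modify_add {α κ : Type} [BEq κ] [LawfulBEq κ]
    (l : List α) (key : α → κ) (w : α → Int) (d : PySem.Dict κ Int) (c : κ) :
    (l.foldl (fun d p => d.modify (key p) 0 (· + w p)) d).getD c 0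
      = d.getD c 0 + ((l.filter (fun p => key p == c)).map w).sum := by
  induction l generalizing d with
  | nil => simp
  | cons p l ih =>
    rw [List.foldl_cons, ih, List.filter_cons]
    by_cases h : key p = c
    · subst h; simp [PySem.Dict.getD_modify_self]; ring
    · rw [PySem.Dict.getD_modify_of_ne _ _ _ (Ne.symm h)]
      simp [h]

theorem polymerSumIte {α : Type} [DecidableEq α] (l : List α) (hl : l.Nodup) (x : α) (h : α → Int)
    (hx : x ∈ l) : (l.map (fun a => if a = x then h a else 0)).sum = h x := by
  induction l with
  | nil => simp at hx
  | cons b l ih =>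
    rcases List.mem_cons.mp hx with rfl | hxl
    · have hz : ∀ a ∈ l, (if a = x then h a else 0) = 0 := by
        intro a ha
        have : a ≠ x := fun hh => (List.nodup_cons.mp hl).1 (hh ▸ ha)
        simp [this]
      simp [List.map_congr_left hz]
    · have hbx : b ≠ x := fun hh => (List.nodup_cons.mp hl).1 (hh ▸ hxl)
      simp [hbx, ih (List.nodup_cons.mp hl).2 hxl]

theorem polymerRegroup {α : Type} [BEq α] [LawfulBEq α] [DecidableEq α] (L : List α) (h : α → Int) :
    (L.map h).sum = (L.dedup.map (fun a => h a * (L.count a : Int))).sum := by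
  induction L with
  | nil => simp
  | cons x L ih =>
    by_cases hx : x ∈ L
    · rw [List.dedup_cons_of_mem hx, List.map_cons, List.sum_cons, ih]
      have hsplit : ∀ a ∈ L.dedup, (fun a => h a * ((x :: L).count a : Int)) a
          = h a * (L.count a : Int) + (if a = x then h a else 0) := by
        intro a _
        simp only [List.count_cons]
        by_cases hax : a = x
        · simp [hax]; ring
        · simp [hax]
          exact Or.inl (fun hh => hax hh.symm)
      rw [List.map_congr_left hsplit, PySem.List.sum_map_add_int,
        polymerSumIte L.dedup L.nodup_dedup x h (List.mem_dedup.mpr hx)]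
      ring
    · rw [List.dedup_cons_of_notMem hx, List.map_cons, List.sum_cons, List.map_cons, List.sum_cons, ih]
      have : ∀ a ∈ L.dedup, (fun a => h a * ((x :: L).count a : Int)) a = h a * (L.count a : Int) := by
        intro a ha
        have hax : a ≠ x := fun hh => hx (hh ▸ List.mem_dedup.mp ha)
        simp only [List.count_cons]
        simp
        exact Or.inl (fun hh => hax hh.symm)
      rw [List.map_congr_left this, List.count_cons_self,
        List.count_eq_zero_of_not_mem hx]
      ring_nf

theorem polymerCountFlatMap {α β : Type} [BEq β] [LawfulBEq β] (L : List α) (g : α → List β) (y : β) :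
    ((L.flatMap g).count y : Int) = (L.map (fun a => ((g a).count y : Int))).sum := by
  induction L with
  | nil => simp
  | cons a L ih => simp [List.flatMap_cons, List.count_append, ih]

theorem polymerPairwiseGetLast {α : Type} (R : α → α → Prop) (l : List α) (hne : l ≠ [])
    (hp : l.Pairwise R) (y : α) (hy : y ∈ l) :
    y = l.getLast hne ∨ R y (l.getLast hne) := by
  induction l with
  | nil => simp at hy
  | cons x t ih =>
    cases t with
    | nil => simp at hy; simp [hy]
    | cons b t' =>
      rw [List.getLast_cons (by simp)]
      rcases List.mem_cons.mp hy with rfl | hyt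
      · right
        exact (List.pairwise_cons.mp hp).1 _ (List.getLast_mem _)
      · exact ih (by simp) (List.pairwise_cons.mp hp).2 hyt

theorem polymerFoldlConst {α β : Type} (l : List α) (f : β → β) (x : β) :
    l.foldl (fun p _ => f p) x = f^[l.length] x := by
  induction l generalizing x with
  | nil => rfl
  | cons a l ih => rw [List.foldl_cons, ih, List.length_cons, Function.iterate_succ_apply]
theorem polymerSumFlatMap {α β : Type} (l : List α) (f : α → List β) (w : β → Int) :
    ((l.flatMap f).map w).sum = (l.map (fun a => ((f a).map w).sum)).sum := by
  induction l with
  | nil => rfl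
  | cons a l ih => simp [List.flatMap_cons, ih]

theorem polymerSumFilter {α : Type} (l : List α) (q : α → Bool) (w : α → Int) :
    ((l.filter q).map w).sum = (l.map (fun a => if q a then w a else 0)).sum := by
  induction l with
  | nil => rfl
  | cons a l ih =>
    rw [List.filter_cons]
    by_cases h : q a <;> simp [h, ih]

-- one B step rewrites a faithful pair counter of L into one of L.flatMap (polymerG m)
theorem polymerStepB_getD (m : PySem.Dict String String) (d : PySem.Dict (Char × Char) Int)
    (L : List (Char × Char)) (hnd : d.keys.Nodup)
    (hgetD : ∀ xy, d.getD xy 0 = (L.count xy : Int))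
    (hmem : ∀ xy, xy ∈ d.keys ↔ xy ∈ L) (c : Char × Char) :
    (polymerStepB m d).getD c 0 = ((L.flatMap (polymerG m)).count c : Int) := by
  have hkeysperm : d.keys.Perm L.dedup :=
    (List.perm_ext_iff_of_nodup hnd L.nodup_dedup).mpr
      (fun a => by rw [hmem, List.mem_dedup])
  rw [polymerStepB]
  have hflat : d.items.foldl (fun nd kn =>
      (polymerPairsB (polymerSeqB m kn.1.1 kn.1.2)).foldl
        (fun nd2 xy => nd2.modify xy 0 (· + kn.2)) nd) PySem.Dict.empty
      = (d.items.flatMap (fun kn => (polymerG m kn.1).map (fun xy => (xy, kn.2)))).foldl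
          (fun nd p => nd.modify p.1 0 (· + p.2)) PySem.Dict.empty := by
    rw [List.foldl_flatMap]
    apply PySem.List.foldl_congr_mem
    intro acc kn _
    rw [List.foldl_map]
    rfl
  rw [hflat]
  have hw := polymerGetD_foldl_modify_add
    (d.items.flatMap (fun kn => (polymerG m kn.1).map (fun xy => (xy, kn.2))))
    (fun p : (Char × Char) × Int => p.1) (fun p : (Char × Char) × Int => p.2)
    PySem.Dict.empty c
  simp only [] at hw
  rw [hw, PySem.Dict.getD_empty, zero_add]
  have hinner : ∀ kn : (Char × Char) × Int,
      ((((polymerG m kn.1).map (fun xy => (xy, kn.2))).filter (fun p => p.1 == c)).map (fun p => p.2)).sum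
        = ((polymerG m kn.1).count c : Int) * kn.2 := by
    intro kn
    rw [List.filter_map, List.map_map]
    have h1 : ((fun p : (Char × Char) × Int => p.1 == c) ∘ (fun xy => (xy, kn.2))) = (fun xy => xy == c) := rfl
    have h2 : ((fun p : (Char × Char) × Int => p.2) ∘ (fun xy : Char × Char => (xy, kn.2))) = (fun _ => kn.2) := rfl
    rw [h1, h2, PySem.List.sum_map_const_int, ← List.countP_eq_length_filter]
    rfl
  rw [List.filter_flatMap, polymerSumFlatMap]
  have : (d.items.map (fun kn =>
      ((((polymerG m kn.1).map (fun xy => (xy, kn.2))).filter (fun p => p.1 == c)).map (fun p => p.2)).sum))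
      = d.items.map (fun kn => ((polymerG m kn.1).count c : Int) * kn.2) := by
    exact List.map_congr_left (fun kn _ => hinner kn)
  rw [this, PySem.Dict.items_eq_map_keys d hnd 0, List.map_map]
  have : d.keys.map ((fun kn : (Char × Char) × Int => ((polymerG m kn.1).count c : Int) * kn.2)
        ∘ (fun k => (k, d.getD k 0)))
      = d.keys.map (fun a => ((polymerG m a).count c : Int) * (L.count a : Int)) := by
    refine List.map_congr_left (fun k _ => ?_)
    simp [Function.comp, hgetD]
  rw [this, (hkeysperm.map _).sum_eq]
  have hre := polymerRegroup L (fun a => ((polymerG m a).count c : Int))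
  rw [polymerCountFlatMap, ← hre]
theorem polymerStepB_flat (m : PySem.Dict String String) (d : PySem.Dict (Char × Char) Int) :
    polymerStepB m d
      = (d.items.flatMap (fun kn => (polymerG m kn.1).map (fun xy => (xy, kn.2)))).foldl
          (fun nd p => nd.modify p.1 0 (· + p.2)) PySem.Dict.empty := by
  rw [polymerStepB, List.foldl_flatMap]
  apply PySem.List.foldl_congr_mem
  intro acc kn _
  rw [List.foldl_map]
  rfl

theorem polymerStepB_keys (m : PySem.Dict String String) (d : PySem.Dict (Char × Char) Int) :
    (polymerStepB m d).keys = PySem.Set.ofList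
      ((d.items.flatMap (fun kn => (polymerG m kn.1).map (fun xy => (xy, kn.2)))).map (fun p => p.1)) := by
  rw [polymerStepB_flat]
  have := PySem.Dict.keys_foldl_modify_key
    (d.items.flatMap (fun kn => (polymerG m kn.1).map (fun xy => (xy, kn.2))))
    (fun p : (Char × Char) × Int => p.1) 0 (fun _ p v => v + p.2) PySem.Dict.empty
  simp only [] at this
  rw [this, PySem.Dict.keys_empty]
  rfl

theorem polymerStepB_keys_nodup (m : PySem.Dict String String) (d : PySem.Dict (Char × Char) Int) :
    (polymerStepB m d).keys.Nodup := by
  rw [polymerStepB_keys]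
  exact PySem.Set.nodup_ofList _

theorem polymerStepB_mem_keys (m : PySem.Dict String String) (d : PySem.Dict (Char × Char) Int)
    (L : List (Char × Char)) (hnd : d.keys.Nodup)
    (hmem : ∀ xy, xy ∈ d.keys ↔ xy ∈ L) (c : Char × Char) :
    c ∈ (polymerStepB m d).keys ↔ c ∈ L.flatMap (polymerG m) := by
  rw [polymerStepB_keys, PySem.Set.mem_ofList, List.mem_map]
  constructor
  · rintro ⟨p, hp, rfl⟩
    rcases List.mem_flatMap.mp hp with ⟨kn, hkn, hpin⟩
    rcases List.mem_map.mp hpin with ⟨xy, hxy, rfl⟩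
    exact List.mem_flatMap.mpr ⟨kn.1, (hmem kn.1).mp (PySem.Dict.mem_keys_of_mem_items d hkn), hxy⟩
  · intro hc
    rcases List.mem_flatMap.mp hc with ⟨a, haL, hca⟩
    have hak : a ∈ d.keys := (hmem a).mpr haL
    have : (a, d.getD a 0) ∈ d.items := by
      rw [PySem.Dict.items_eq_map_keys d hnd 0]
      exact List.mem_map.mpr ⟨a, hak, rfl⟩
    refine ⟨(c, d.getD a 0), List.mem_flatMap.mpr ⟨(a, d.getD a 0), this, ?_⟩, rfl⟩
    exact List.mem_map.mpr ⟨c, hca, rfl⟩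

theorem polymerIterInv (m : PySem.Dict String String) (P0 : List (Char × Char)) (k : Nat) :
    ((polymerStepB m)^[k] (PySem.Dict.counter P0)).keys.Nodup
    ∧ (∀ xy, ((polymerStepB m)^[k] (PySem.Dict.counter P0)).getD xy 0
        = (((fun L => L.flatMap (polymerG m))^[k] P0).count xy : Int))
    ∧ (∀ xy, xy ∈ ((polymerStepB m)^[k] (PySem.Dict.counter P0)).keys
        ↔ xy ∈ (fun L => L.flatMap (polymerG m))^[k] P0) := by
  induction k with
  | zero =>
    refine ⟨PySem.Dict.nodup_keys_counter _, fun xy => PySem.Dict.getD_counter _ _, fun xy => ?_⟩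
    simp [PySem.Dict.keys_counter, PySem.Set.mem_ofList]
  | succ k ih =>
    obtain ⟨hnd, hgetD, hmem⟩ := ih
    rw [Function.iterate_succ_apply', Function.iterate_succ_apply']
    exact ⟨polymerStepB_keys_nodup m _,
      fun xy => polymerStepB_getD m _ _ hnd hgetD hmem xy,
      fun xy => polymerStepB_mem_keys m _ _ hnd hmem xy⟩
theorem polymerPyGetLast {α : Type} (l : List α) (h : l ≠ []) :
    PySem.List.pyGet? l (-1) = l.getLast? := by
  have hn : 0 < l.length := List.length_pos_iff.mpr h
  simp only [PySem.List.pyGet?, PySem.List.pyIdx?]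
  norm_num
  rw [if_pos (by omega : 1 ≤ l.length)]
  simp [List.getLast?_eq_getElem?]

theorem polymerPyGetHead {α : Type} (l : List α) : PySem.List.pyGet? l 0 = l.head? := by
  simp only [PySem.List.pyGet?, PySem.List.pyIdx?]
  norm_num
  cases l <;> simp

theorem polymerIterNeNil (m : PySem.Dict String String) (k : Nat) (l : List Char) (h : l ≠ []) :
    (polymerFstep m)^[k] l ≠ [] := by
  induction k with
  | zero => simpa using h
  | succ k ih =>
    rw [Function.iterate_succ_apply']
    obtain ⟨c, t, hct⟩ := List.exists_cons_of_ne_nil ih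
    rw [hct]
    exact polymerFstep_ne_nil m c t

theorem polymerIterPairs (m : PySem.Dict String String) (k : Nat) (l : List Char) :
    polymerPairsB ((polymerFstep m)^[k] l)
      = (fun L => L.flatMap (polymerG m))^[k] (polymerPairsB l) := by
  induction k with
  | zero => rfl
  | succ k ih =>
    rw [Function.iterate_succ_apply', Function.iterate_succ_apply',
      polymerPairsB_fstep, ih]

theorem polymerIterLast (m : PySem.Dict String String) (k : Nat) (l : List Char) :
    ((polymerFstep m)^[k] l).getLast? = l.getLast? := by
  induction k with
  | zero => rfl
  | succ k ih => rw [Function.iterate_succ_apply', polymerFstep_getLast?, ih]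

theorem polymerNodupModify {κ ν : Type} [BEq κ] [LawfulBEq κ] (d : PySem.Dict κ ν)
    (k : κ) (d0 : ν) (f : ν → ν) (h : d.keys.Nodup) : (d.modify k d0 f).keys.Nodup := by
  rw [PySem.Dict.keys_modify]
  by_cases hc : d.contains k
  · rw [PySem.Dict.keys_insert_of_contains _ _ hc]; exact h
  · rw [PySem.Dict.keys_insert_of_not_contains _ _ (by simpa using hc)]
    refine List.nodup_append.mpr ⟨h, List.nodup_singleton _, ?_⟩
    intro a ha b hb
    have hb' : b = k := by simpa using hb
    subst hb'
    intro hak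
    exact absurd ((PySem.Dict.contains_iff_mem_keys d b).mpr (hak ▸ ha)) (by simpa using hc)

theorem polymerSetUpdateNil {α : Type} [BEq α] (xs : List α) :
    PySem.Set.update [] xs = PySem.Set.ofList xs := (PySem.Set.ofList_eq_foldl xs).symm
theorem polymerCounts0_getD (pairsD : PySem.Dict (Char × Char) Int) (Q : List (Char × Char))
    (hnd : pairsD.keys.Nodup) (hgetD : ∀ xy, pairsD.getD xy 0 = (Q.count xy : Int))
    (hmemk : ∀ xy, xy ∈ pairsD.keys ↔ xy ∈ Q) (c : Char) :
    (pairsD.items.foldl (fun d kn => d.modify kn.1.1 0 (· + kn.2)) PySem.Dict.empty).getD c 0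
      = (Q.countP (fun ab => ab.1 == c) : Int) := by
  have hkeysperm : pairsD.keys.Perm Q.dedup :=
    (List.perm_ext_iff_of_nodup hnd Q.nodup_dedup).mpr (fun a => by rw [hmemk, List.mem_dedup])
  have hw := polymerGetD_foldl_modify_add pairsD.items
    (fun kn : (Char × Char) × Int => kn.1.1) (fun kn => kn.2) PySem.Dict.empty c
  simp only [] at hw
  rw [hw, PySem.Dict.getD_empty, zero_add,
    PySem.Dict.items_eq_map_keys pairsD hnd 0, List.filter_map, List.map_map]
  have h1 : ((fun kn : (Char × Char) × Int => kn.1.1 == c) ∘ (fun ab : Char × Char => (ab, pairsD.getD ab 0)))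
      = (fun ab : Char × Char => ab.1 == c) := rfl
  have h2 : ((fun kn : (Char × Char) × Int => kn.2) ∘ (fun ab : Char × Char => (ab, pairsD.getD ab 0)))
      = (fun ab : Char × Char => pairsD.getD ab 0) := rfl
  rw [h1, h2]
  have h3 : (pairsD.keys.filter (fun ab => ab.1 == c)).map (fun ab => pairsD.getD ab 0)
      = (pairsD.keys.filter (fun ab => ab.1 == c)).map (fun ab => (Q.count ab : Int)) :=
    List.map_congr_left (fun ab _ => hgetD ab)
  rw [h3, ((hkeysperm.filter _).map _).sum_eq, polymerSumFilter]
  have h4 : Q.dedup.map (fun a => if (fun ab : Char × Char => ab.1 == c) a then (Q.count a : Int) else 0)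
      = Q.dedup.map (fun a => (fun ab : Char × Char => if ab.1 == c then (1:Int) else 0) a * (Q.count a : Int)) := by
    refine List.map_congr_left (fun a _ => ?_)
    by_cases hq : a.1 = c <;> simp [hq]
  rw [h4, ← polymerRegroup Q (fun ab : Char × Char => if ab.1 == c then (1:Int) else 0)]
  exact PySem.List.sum_map_ite_one_zero (fun ab : Char × Char => ab.1 == c) Q

theorem polymerCounts0_mem (pairsD : PySem.Dict (Char × Char) Int) (Q : List (Char × Char))
    (hnd : pairsD.keys.Nodup)
    (hmemk : ∀ xy, xy ∈ pairsD.keys ↔ xy ∈ Q) (c : Char) :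
    c ∈ (pairsD.items.foldl (fun d kn => d.modify kn.1.1 0 (· + kn.2)) PySem.Dict.empty).keys
      ↔ ∃ ab ∈ Q, ab.1 = c := by
  have hk := PySem.Dict.keys_foldl_modify_key pairsD.items
    (fun kn : (Char × Char) × Int => kn.1.1) 0 (fun _ kn v => v + kn.2) PySem.Dict.empty
  simp only [] at hk
  rw [hk, PySem.Dict.keys_empty, polymerSetUpdateNil, PySem.Set.mem_ofList, List.mem_map]
  constructor
  · rintro ⟨kn, hkn, rfl⟩
    exact ⟨kn.1, (hmemk kn.1).mp (PySem.Dict.mem_keys_of_mem_items pairsD hkn), rfl⟩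
  · rintro ⟨ab, habQ, rfl⟩
    have hak : ab ∈ pairsD.keys := (hmemk ab).mpr habQ
    refine ⟨(ab, pairsD.getD ab 0), ?_, rfl⟩
    rw [PySem.Dict.items_eq_map_keys pairsD hnd 0]
    exact List.mem_map.mpr ⟨ab, hak, rfl⟩

-- ===== VERDICT (by name: the statement is the Claim_ definition above) =====
theorem polymer_step_spec : Claim_equal_polymer_step := by
  unfold Claim_equal_polymer_step
  intro pt mapping step _hdom hpre
  unfold Pre_polymer_step at hpre
  unfold Spec_polymer_step
  have h0 : pt.toList ≠ [] := by simpa using hpre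
  simp only [polymer_step, polymer_step_alt]
  generalize PySem.Dict.ofList mapping = m
  -- both loops are k-fold iterations
  have hF : (PySem.List.pyRange 0 step 1).foldl (fun p (_ : Int) => polymerGoA m p 0 []) pt.toList
      = (polymerFstep m)^[(PySem.List.pyRange 0 step 1).length] pt.toList := by
    have hfun : (fun (p : List Char) (_ : Int) => polymerGoA m p 0 []) = (fun p _ => polymerFstep m p) := by
      funext p x
      rw [polymerGoA_eq]
      simp
    rw [hfun, polymerFoldlConst]
  have hBfold : (PySem.List.pyRange 0 step 1).foldl (fun d (_ : Int) => polymerStepB m d)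
        (PySem.Dict.counter (polymerPairsB pt.toList))
      = (polymerStepB m)^[(PySem.List.pyRange 0 step 1).length]
          (PySem.Dict.counter (polymerPairsB pt.toList)) :=
    polymerFoldlConst _ _ _
  rw [hF, hBfold]
  set k := (PySem.List.pyRange 0 step 1).length with hk
  set F := (polymerFstep m)^[k] pt.toList with hFdef
  set D := (polymerStepB m)^[k] (PySem.Dict.counter (polymerPairsB pt.toList)) with hDdef
  set Q := (fun L => L.flatMap (polymerG m))^[k] (polymerPairsB pt.toList) with hQdef
  have hFne : F ≠ [] := polymerIterNeNil m k _ h0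
  have hQeq : polymerPairsB F = Q := polymerIterPairs m k pt.toList
  have hlastF : F.getLast? = pt.toList.getLast? := polymerIterLast m k pt.toList
  obtain ⟨ch, hch⟩ : ∃ ch, pt.toList.getLast? = some ch :=
    ⟨pt.toList.getLast h0, List.getLast?_eq_getLast _⟩
  have hchF : F.getLast? = some ch := hlastF.trans hch
  have hchmem : ch ∈ F := List.mem_of_getLast? hchF
  have hStrGet : PySem.Str.pyGet? pt (-1) = some ch := by
    simp only [PySem.Str.pyGet?, PySem.Chars.pyGet?]
    rw [polymerPyGetLast _ h0, hch]
  obtain ⟨hnd, hgetD, hmemk⟩ := polymerIterInv m (polymerPairsB pt.toList) k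
  -- the character-count dictionary of B
  have hc0getD := polymerCounts0_getD D Q hnd hgetD hmemk
  have hc0mem := polymerCounts0_mem D Q hnd hmemk
  have hc0nodup : (D.items.foldl (fun d kn => d.modify kn.1.1 0 (· + kn.2)) PySem.Dict.empty).keys.Nodup := by
    have := PySem.Dict.nodup_keys_foldl_modify_key D.items
      (fun kn : (Char × Char) × Int => kn.1.1) 0 (fun _ kn v => v + kn.2) PySem.Dict.empty
      (by rw [PySem.Dict.keys_empty]; exact List.nodup_nil)
    simpa using this
  set counts := (D.items.foldl (fun d kn => d.modify kn.1.1 0 (· + kn.2)) PySem.Dict.empty).modify ch 0 (· + 1) with hcounts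
  have hcgetD : ∀ c, counts.getD c 0 = (F.count c : Int) := by
    intro c
    have hcount := polymerCount_eq F hFne c
    rw [hQeq, hchF] at hcount
    rw [hcounts, PySem.Dict.getD_modify]
    by_cases hcch : c = ch
    · subst hcch
      rw [if_pos rfl, hc0getD, hcount, if_pos rfl]
      push_cast
      ring
    · rw [if_neg hcch, hc0getD, hcount, if_neg (by simpa using fun hh => hcch hh.symm)]
      push_cast
      ring
  have hcmem : ∀ c, c ∈ counts.keys ↔ c ∈ F := by
    intro c
    rw [hcounts, PySem.Dict.keys_modify, PySem.Dict.mem_keys_insert, hc0mem]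
    rw [← List.count_pos_iff (a := c) (l := F)]
    have hcount := polymerCount_eq F hFne c
    rw [hQeq, hchF] at hcount
    constructor
    · rintro (rfl | ⟨ab, habQ, hab1⟩)
      · rw [hcount, if_pos rfl]; omega
      · have : 0 < Q.countP (fun ab => ab.1 == c) :=
          List.countP_pos_iff.mpr ⟨ab, habQ, by simpa using hab1⟩
        rw [hcount]; omega
    · intro hpos
      rw [hcount] at hpos
      by_cases hcch : c = ch
      · exact Or.inl hcch
      · rw [if_neg (by simpa using fun hh => hcch hh.symm)] at hpos
        have : 0 < Q.countP (fun ab => ab.1 == c) := by omega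
        obtain ⟨ab, habQ, hab1⟩ := List.countP_pos_iff.mp this
        exact Or.inr ⟨ab, habQ, by simpa using hab1⟩
  have hcnodup : counts.keys.Nodup := polymerNodupModify _ _ _ _ hc0nodup
  -- the two value multisets agree
  have hvals : counts.values = counts.keys.map (fun c => (F.count c : Int)) := by
    rw [PySem.Dict.values_eq_map_keys counts hcnodup 0]
    exact List.map_congr_left (fun c _ => hcgetD c)
  have hkeysperm2 : counts.keys.Perm (PySem.Set.ofList F) :=
    (List.perm_ext_iff_of_nodup hcnodup (PySem.Set.nodup_ofList F)).mpr
      (fun c => by rw [hcmem, PySem.Set.mem_ofList])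
  have hAvals : (PySem.Dict.counter F).items.map (fun kv => kv.2)
      = (PySem.Set.ofList F).map (fun c => (F.count c : Int)) := by
    rw [PySem.Dict.items_counter, List.map_map]
    rfl
  have hvperm : counts.values.Perm ((PySem.Dict.counter F).items.map (fun kv => kv.2)) := by
    rw [hvals, hAvals]
    exact hkeysperm2.map _
  -- A's sorted most_common list
  have hitemsAne : (PySem.Dict.counter F).items ≠ [] := by
    have hmemF : ch ∈ PySem.Set.ofList F := (PySem.Set.mem_ofList F ch).mpr hchmem
    rw [PySem.Dict.items_counter]
    exact List.ne_nil_of_mem (List.mem_map.mpr ⟨ch, hmemF, rfl⟩)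
  set S := PySem.List.sorted (PySem.Dict.counter F).items (fun kv => kv.2) true with hS
  have hSne : S ≠ [] := by
    rw [hS]
    intro hc
    exact hitemsAne ((PySem.List.sorted_eq_nil_iff _ _ _).mp hc)
  obtain ⟨mc, t', hSeq⟩ := List.exists_cons_of_ne_nil hSne
  have hget0 : PySem.List.pyGet? S 0 = some mc := by
    rw [polymerPyGetHead, hSeq]
    rfl
  have hgetm1 : PySem.List.pyGet? S (-1) = some (S.getLast hSne) := by
    rw [polymerPyGetLast _ hSne, List.getLast?_eq_getLast]
  have hmcmax : ∀ y ∈ (PySem.Dict.counter F).items, y.2 ≤ mc.2 :=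
    PySem.List.key_head_sorted_rev_ge _ _ hSeq
  have hmcmem : mc ∈ (PySem.Dict.counter F).items := by
    have : mc ∈ S := by rw [hSeq]; exact List.mem_cons_self
    exact (PySem.List.mem_sorted _ _ _ _).mp this
  have hlcmin : ∀ y ∈ (PySem.Dict.counter F).items, (S.getLast hSne).2 ≤ y.2 := by
    intro y hy
    have hyS : y ∈ S := (PySem.List.mem_sorted _ _ _ _).mpr hy
    rcases polymerPairwiseGetLast _ S hSne (PySem.List.sorted_pairwise_rev _ _) y hyS with h | h
    · rw [h]
    · exact h
  have hlcmem : (S.getLast hSne) ∈ (PySem.Dict.counter F).items :=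
    (PySem.List.mem_sorted _ _ _ _).mp (List.getLast_mem hSne)
  -- B's max and min exist
  have hvalsne : counts.values ≠ [] := by
    rw [hvals]
    intro hc
    have hkeysnil : counts.keys = [] := List.map_eq_nil_iff.mp hc
    have : ch ∈ counts.keys := (hcmem ch).mpr hchmem
    rw [hkeysnil] at this
    simp at this
  obtain ⟨mx, hmx⟩ : ∃ mx, PySem.List.max? counts.values (fun x => x) = some mx := by
    cases hmx : PySem.List.max? counts.values (fun x => x) with
    | none => exact absurd ((PySem.List.max?_eq_none_iff _ _).mp hmx) hvalsne
    | some mx => exact ⟨mx, rfl⟩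
  obtain ⟨mn, hmn⟩ : ∃ mn, PySem.List.min? counts.values (fun x => x) = some mn := by
    cases hmn : PySem.List.min? counts.values (fun x => x) with
    | none => exact absurd ((PySem.List.min?_eq_none_iff _ _).mp hmn) hvalsne
    | some mn => exact ⟨mn, rfl⟩
  -- the four extremal values coincide pairwise
  have hmceq : mc.2 = mx := by
    have h1 : mc.2 ≤ mx := by
      refine PySem.List.max?_isMax hmx mc.2 ?_
      exact hvperm.mem_iff.mpr (List.mem_map.mpr ⟨mc, hmcmem, rfl⟩)
    have h2 : mx ≤ mc.2 := by
      have : mx ∈ (PySem.Dict.counter F).items.map (fun kv => kv.2) :=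
        hvperm.mem_iff.mp (PySem.List.max?_mem hmx)
      obtain ⟨y, hy, hyx⟩ := List.mem_map.mp this
      exact hyx ▸ hmcmax y hy
    omega
  have hlceq : (S.getLast hSne).2 = mn := by
    have h1 : mn ≤ (S.getLast hSne).2 := by
      refine PySem.List.min?_isMin hmn _ ?_
      exact hvperm.mem_iff.mpr (List.mem_map.mpr ⟨S.getLast hSne, hlcmem, rfl⟩)
    have h2 : (S.getLast hSne).2 ≤ mn := by
      have : mn ∈ (PySem.Dict.counter F).items.map (fun kv => kv.2) :=
        hvperm.mem_iff.mp (PySem.List.min?_mem hmn)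
      obtain ⟨y, hy, hyx⟩ := List.mem_map.mp this
      exact hyx ▸ hlcmin y hy
    omega
  rw [hget0, hgetm1, hStrGet]
  simp only []
  rw [← hcounts, hmx, hmn]
  simp only []
  rw [hmceq, hlceq]
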